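-- pv_equiv track=rewrite | github.com/asheorann/bioinformatics_algorithms | 04_Allignment/4.7_Overlap_Alignment_Problem.py | OverlapAlignment
-- ===== SOURCE A (Python) =====
-- from typing import List, Dict, Iterable, Tuple
--
-- def OverlapAlignment(match_reward: int, mismatch_penalty: int, indel_penalty: int,
--                     s: str, t: str) -> Tuple[int, str, str]:
--     ls = len(s) +1
--     lt = len(t)+1
--     sm = [[0 for x in range(lt)] for y in range(ls)]
--     for j in range(1, lt):
--         sm[0][j] = -j*indel_penalty
--
--     #fill in matrix
--     for i in range(1, ls):
--           for j in range(1, lt):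
--             if s[i-1]==t[j-1]:
--                   score = match_reward
--             else:
--                 score = -mismatch_penalty
--             sm[i][j] = max(sm[i][j-1]-indel_penalty, sm[i-1][j]-indel_penalty, sm[i-1][j-1]+score)
--
--     #this is the max in the list
--     maxValue = max(sm[-1])
--     indexj = sm[-1].index(maxValue)
--     indexi =ls-1
--     #now we can traceback and find until it gets to the start of the line
--     als = ""
--     alt = ""
--     i = indexi
--     j=indexj
--     while j>0 and i>0:
--         if s[i-1] == t[j-1]:
--             curr = sm[i][j]
--             diag = sm[i-1][j-1]+match_reward
--             if curr == diag:
--                 als = s[i - 1] + als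
--                 alt = t[j - 1] + alt
--                 i -= 1
--                 j -= 1
--                 continue
--         elif sm[i][j] == sm[i-1][j-1] - mismatch_penalty:
--             als = s[i - 1] + als
--             alt = t[j - 1] + alt
--             i -= 1
--             j -= 1
--             continue
--
--         if (sm[i][j] ==(sm[i][j-1]- indel_penalty)):
--             alt = t[j-1]+alt
--             als = '-'+als
--             j-=1
--         elif (sm[i][j] ==(sm[i-1][j]- indel_penalty)):
--             alt = '-'+alt
--             als = s[i-1]+als
--             i-=1
--       #  else:
--        #     alt = t[j - 1] + alt
--         #    als = s[i-1] + als
--          #   i -= 1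
--           #  j -= 1
--            # sm[i][j] -= mismatch_penalty
--     if j > 0:
--         alt = t[:j] + alt
--         als = '-' * j + als
--     ans = (maxValue, als, alt)
--     return ans
-- ===== SOURCE B (Python) =====
-- def OverlapAlignment(match_reward: int, mismatch_penalty: int, indel_penalty: int,
--                      s: str, t: str):
--     # Single-phase DP over full solutions: every cell stores (score, aligned_s,
--     # aligned_t) for its best suffix-free prefix alignment (choice priority
--     # diagonal > left > up), so there is NO traceback phase at all; at the end
--     # the best last-row cell already holds the answer.
--     lt = len(t) + 1
--     row = [(-j * indel_penalty, '-' * j, t[:j]) for j in range(lt)]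
--     for ch in s:
--         new = [(0, '', '')]
--         for j in range(1, lt):
--             dv, da, db = row[j - 1]
--             d = dv + (match_reward if ch == t[j - 1] else -mismatch_penalty)
--             lv, la, lb = new[j - 1]
--             l = lv - indel_penalty
--             uv, ua, ub = row[j]
--             u = uv - indel_penalty
--             v = max(d, l, u)
--             if v == d:
--                 cell = (v, da + ch, db + t[j - 1])
--             elif v == l:
--                 cell = (v, la + '-', lb + t[j - 1])
--             else:
--                 cell = (v, ua + ch, ub + '-')
--             new.append(cell)
--         row = new
--     scores = [c[0] for c in row]
--     maxValue = max(scores)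
--     j = scores.index(maxValue)
--     return (maxValue, row[j][1], row[j][2])
-- ===== Notes on version B (the rewrite author's own statement) =====
-- stated objective: alternative
-- what changed: B is a single-phase DP whose cells store complete solutions (score, aligned s, aligned t) built forward with priority diagonal > left > up over one rolling row, so the separate score matrix and the score-comparing traceback phase of A disappear entirely; the chosen last-row cell already holds the answer.
import Mathlib
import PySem

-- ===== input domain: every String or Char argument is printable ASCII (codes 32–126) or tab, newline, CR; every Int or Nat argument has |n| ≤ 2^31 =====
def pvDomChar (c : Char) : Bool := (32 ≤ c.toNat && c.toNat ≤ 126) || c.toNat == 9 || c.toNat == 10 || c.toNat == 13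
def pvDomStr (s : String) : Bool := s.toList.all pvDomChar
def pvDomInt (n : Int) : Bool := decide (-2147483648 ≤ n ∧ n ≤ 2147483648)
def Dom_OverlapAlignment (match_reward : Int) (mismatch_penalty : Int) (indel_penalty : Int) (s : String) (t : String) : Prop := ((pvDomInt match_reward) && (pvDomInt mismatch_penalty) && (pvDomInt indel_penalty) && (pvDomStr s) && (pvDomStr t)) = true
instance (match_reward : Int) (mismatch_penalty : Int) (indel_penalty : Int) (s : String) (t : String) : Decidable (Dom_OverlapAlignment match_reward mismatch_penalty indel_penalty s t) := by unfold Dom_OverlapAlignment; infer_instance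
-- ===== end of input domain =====

-- B replaces A's two-phase fill+score-comparing-traceback by a single DP whose cells
-- store full (score, aligned s, aligned t) solutions, so no traceback phase exists;
-- same results by a different algorithm (objective: alternative).


-- ===== PORT A =====
-- A fills the whole (|s|+1)×(|t|+1) score matrix, takes max of the last row (first
-- occurrence) and traces back by comparing scores (diag, then left, then up),
-- prepending characters; the Python string accumulators are ported as List Char
-- (PySem strings are List Char underneath), converted to String once at the end.

/-- inner j-loop of A's fill: walks t together with the tail of the previous row,
    carrying (left, diag) = (sm[i][j-1], sm[i-1][j-1]). -/
def pvGoA (mr mp ind : Int) (si : Char) : List Char → List Int → Int → Int → List Int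
  | c :: ts, up :: ps, left, diag =>
      let v := max (left - ind) (max (up - ind) (diag + (if si = c then mr else -mp)))
      v :: pvGoA mr mp ind si ts ps v up
  | _, _, _, _ => []

/-- one row of A's fill (column 0 stays 0, as in the Python initialisation). -/
def pvRowA (mr mp ind : Int) (prev : List Int) (si : Char) (tl : List Char) : List Int :=
  0 :: pvGoA mr mp ind si tl prev.tail 0 (prev.headD 0)

/-- the outer i-loop: the whole matrix sm, row by row. -/
def pvRowsA (mr mp ind : Int) (tl : List Char) : List Char → List Int → List (List Int)
  | [], prev => [prev]
  | c :: cs, prev => prev :: pvRowsA mr mp ind tl cs (pvRowA mr mp ind prev c tl)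

/-- sm[i][j] (indices always in range where used). -/
def pvGet2 (m : List (List Int)) (i j : Nat) : Int := (m.getD i []).getD j 0

/-- A's while-loop, with the Python post-loop `if j > 0` fixup applied at loop exit.
    The final `else` arm is unreachable on a genuine DP matrix (there Python would
    loop forever, since the loop body changes nothing). -/
def pvTbA (mr mp ind : Int) (sl tl : List Char) (sm : List (List Int)) :
    Nat → Nat → List Char → List Char → List Char × List Char
  | i+1, j+1, als, alt =>
      if sl.getD i ' ' = tl.getD j ' ' ∧ pvGet2 sm (i+1) (j+1) = pvGet2 sm i j + mr then
        pvTbA mr mp ind sl tl sm i j (sl.getD i ' ' :: als) (tl.getD j ' ' :: alt)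
      else if ¬ sl.getD i ' ' = tl.getD j ' ' ∧ pvGet2 sm (i+1) (j+1) = pvGet2 sm i j - mp then
        pvTbA mr mp ind sl tl sm i j (sl.getD i ' ' :: als) (tl.getD j ' ' :: alt)
      else if pvGet2 sm (i+1) (j+1) = pvGet2 sm (i+1) j - ind then
        pvTbA mr mp ind sl tl sm (i+1) j ('-' :: als) (tl.getD j ' ' :: alt)
      else if pvGet2 sm (i+1) (j+1) = pvGet2 sm i (j+1) - ind then
        pvTbA mr mp ind sl tl sm i (j+1) (sl.getD i ' ' :: als) ('-' :: alt)
      else (als, alt)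
  | 0, j, als, alt =>
      if j = 0 then (als, alt)
      else (List.replicate j '-' ++ als, tl.take j ++ alt)
  | _+1, 0, als, alt => (als, alt)
  termination_by i j _ _ => i + j

def OverlapAlignment (match_reward : Int) (mismatch_penalty : Int) (indel_penalty : Int) (s : String) (t : String) : Int × String × String :=
  let sl := s.toList
  let tl := t.toList
  let sm := pvRowsA match_reward mismatch_penalty indel_penalty tl sl
              ((List.range (tl.length + 1)).map (fun j : Nat => -(j : Int) * indel_penalty))
  let last := sm.getLastD []
  let maxValue := (PySem.List.max? last (fun x => x)).getD 0   -- last row is nonempty: default unreachable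
  let indexj := (PySem.List.index? last maxValue).getD 0       -- maxValue occurs in last: default unreachable
  let p := pvTbA match_reward mismatch_penalty indel_penalty sl tl sm sl.length indexj [] []
  (maxValue, String.ofList p.1, String.ofList p.2)

-- ===== PORT B =====
-- B is a single-phase DP: each cell stores the complete solution (score, aligned s,
-- aligned t), built forward with choice priority diagonal > left > up; there is no
-- traceback — the chosen last-row cell already holds the answer. One rolling row.

/-- inner j-loop of B: walks t with the tail of the previous row of triples,
    carrying (left, diag) cells of the current/previous row. -/
def pvGoC (mr mp ind : Int) (si : Char) :
    List Char → List (Int × List Char × List Char) →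
    (Int × List Char × List Char) → (Int × List Char × List Char) →
    List (Int × List Char × List Char)
  | c :: ts, up :: ps, left, diag =>
      let d := diag.1 + (if si = c then mr else -mp)
      let l := left.1 - ind
      let u := up.1 - ind
      let v := max d (max l u)
      let cell :=
        if v = d then (v, diag.2.1 ++ [si], diag.2.2 ++ [c])
        else if v = l then (v, left.2.1 ++ ['-'], left.2.2 ++ [c])
        else (v, up.2.1 ++ [si], up.2.2 ++ ['-'])
      cell :: pvGoC mr mp ind si ts ps cell up
  | _, _, _, _ => []

/-- one row of B (column 0 is the empty alignment with score 0). -/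
def pvRowC (mr mp ind : Int) (prev : List (Int × List Char × List Char)) (si : Char)
    (tl : List Char) : List (Int × List Char × List Char) :=
  (0, [], []) :: pvGoC mr mp ind si tl prev.tail ((0 : Int), [], []) (prev.headD (0, [], []))

/-- B's outer loop: rolling row of solution triples. -/
def pvFillC (mr mp ind : Int) (tl : List Char) :
    List Char → List (Int × List Char × List Char) → List (Int × List Char × List Char)
  | [], prev => prev
  | c :: cs, prev => pvFillC mr mp ind tl cs (pvRowC mr mp ind prev c tl)

def OverlapAlignment_alt (match_reward : Int) (mismatch_penalty : Int) (indel_penalty : Int) (s : String) (t : String) : Int × String × String :=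
  let sl := s.toList
  let tl := t.toList
  let row := pvFillC match_reward mismatch_penalty indel_penalty tl sl
      ((List.range (tl.length + 1)).map
        (fun j : Nat => (-(j : Int) * indel_penalty, List.replicate j '-', tl.take j)))
  let scores := row.map (fun c => c.1)
  let maxValue := (PySem.List.max? scores (fun x => x)).getD 0
  let indexj := (PySem.List.index? scores maxValue).getD 0
  let cell := row.getD indexj (0, [], [])
  (maxValue, String.ofList cell.2.1, String.ofList cell.2.2)

-- ===== PRECONDITION & SPEC =====
def Spec_OverlapAlignment (match_reward : Int) (mismatch_penalty : Int) (indel_penalty : Int) (s : String) (t : String) (out : Int × String × String) : Prop := out = OverlapAlignment_alt match_reward mismatch_penalty indel_penalty s t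
instance (match_reward : Int) (mismatch_penalty : Int) (indel_penalty : Int) (s : String) (t : String) (out : Int × String × String) : Decidable (Spec_OverlapAlignment match_reward mismatch_penalty indel_penalty s t out) := by unfold Spec_OverlapAlignment; infer_instance

-- ===== CLAIM (what is proved, stated in full; the proofs are below) =====
def Claim_equal_OverlapAlignment : Prop := ∀ (match_reward : Int) (mismatch_penalty : Int) (indel_penalty : Int) (s : String) (t : String), Dom_OverlapAlignment match_reward mismatch_penalty indel_penalty s t → Spec_OverlapAlignment match_reward mismatch_penalty indel_penalty s t (OverlapAlignment match_reward mismatch_penalty indel_penalty s t)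

-- ===== LEMMAS AND PROOFS =====

-- ---- small getD helpers ----
theorem pvHeadD_getD (l : List Int) (d : Int) : l.headD d = l.getD 0 d := by
  cases l <;> rfl

theorem pvTail_getD (l : List Int) (r : Nat) (d : Int) : l.tail.getD r d = l.getD (r + 1) d := by
  cases l <;> simp [List.getD]

theorem pvHeadD_getD' {α : Type} (l : List α) (d : α) : l.headD d = l.getD 0 d := by
  cases l <;> rfl

theorem pvTail_getD' {α : Type} (l : List α) (r : Nat) (d : α) :
    l.tail.getD r d = l.getD (r + 1) d := by
  cases l <;> simp [List.getD]

-- ---- the mathematical DP score table ----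
def pvFrow (ind : Int) (scr P : Nat → Int) : Nat → Int
  | 0 => 0
  | j + 1 => max (pvFrow ind scr P j - ind) (max (P (j + 1) - ind) (P j + scr j))

def pvF (mr mp ind : Int) (sl tl : List Char) : Nat → Nat → Int
  | 0 => fun j => -(j : Int) * ind
  | i + 1 => pvFrow ind (fun j => if sl.getD i ' ' = tl.getD j ' ' then mr else -mp)
      (pvF mr mp ind sl tl i)

theorem pvF_succ_succ (mr mp ind : Int) (sl tl : List Char) (i j : Nat) :
    pvF mr mp ind sl tl (i + 1) (j + 1)
      = max (pvF mr mp ind sl tl (i + 1) j - ind)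
          (max (pvF mr mp ind sl tl i (j + 1) - ind)
            (pvF mr mp ind sl tl i j + (if sl.getD i ' ' = tl.getD j ' ' then mr else -mp))) := rfl

-- ---- characterisation of A's inner loop ----
theorem pvGoA_spec (mr mp ind : Int) (tl : List Char) (si : Char) (P : Nat → Int) :
    ∀ (ts : List Char) (ps : List Int) (k : Nat),
      ts = tl.drop k → ps.length = ts.length →
      (∀ r, r < ps.length → ps.getD r 0 = P (k + 1 + r)) →
      ∀ m, m < ts.length →
        (pvGoA mr mp ind si ts ps
            (pvFrow ind (fun j => if si = tl.getD j ' ' then mr else -mp) P k) (P k)).getD m 0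
          = pvFrow ind (fun j => if si = tl.getD j ' ' then mr else -mp) P (k + 1 + m) := by
  intro ts
  induction ts with
  | nil => intro ps k _ _ _ m hm; simp at hm
  | cons c ts ih =>
    intro ps k hts hlen hp m hm
    cases ps with
    | nil => simp at hlen
    | cons up ps =>
      have hc : tl.getD k ' ' = c := by
        have h1 : tl[k]? = some c := by
          have := congrArg List.head? hts
          simpa [List.head?_drop] using this.symm
        simp [List.getD, h1]
      have hts' : ts = tl.drop (k + 1) := by
        have := congrArg List.tail hts
        simpa [List.tail_drop] using this
      have hup : up = P (k + 1) := by
        have := hp 0 (by simp)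
        simpa using this
      have hhead : max (pvFrow ind (fun j => if si = tl.getD j ' ' then mr else -mp) P k - ind)
            (max (up - ind) (P k + (if si = c then mr else -mp)))
          = pvFrow ind (fun j => if si = tl.getD j ' ' then mr else -mp) P (k + 1) := by
        rw [hup, ← hc]
        rfl
      cases m with
      | zero =>
        simp only [pvGoA, hhead, List.getD_cons_zero]
      | succ m =>
        have harr : k + 1 + 1 + m = k + 1 + (m + 1) := by omega
        simp only [pvGoA, hhead, List.getD_cons_succ]
        rw [hup]
        rw [ih ps (k+1) hts' (by simpa using hlen)
            (fun r hr => by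
              have := hp (r + 1) (by simpa using Nat.succ_lt_succ hr)
              simpa [Nat.add_assoc, Nat.add_comm, Nat.add_left_comm] using this)
            m (by simpa using hm)]
        rw [harr]

-- ---- lengths ----
theorem pvGoA_length (mr mp ind : Int) (si : Char) :
    ∀ (ts : List Char) (ps : List Int) (left diag : Int), ps.length = ts.length →
      (pvGoA mr mp ind si ts ps left diag).length = ts.length := by
  intro ts
  induction ts with
  | nil => intro ps l d h; cases ps <;> simp [pvGoA]
  | cons c ts ih =>
    intro ps l d h
    cases ps with
    | nil => simp at h
    | cons up ps => simp only [pvGoA, List.length_cons]; rw [ih _ _ _ (by simpa using h)]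

theorem pvRowA_length (mr mp ind : Int) (prev : List Int) (si : Char) (tl : List Char)
    (h : prev.length = tl.length + 1) :
    (pvRowA mr mp ind prev si tl).length = tl.length + 1 := by
  simp only [pvRowA, List.length_cons]
  rw [pvGoA_length _ _ _ _ _ _ _ _ (by simp [h])]

theorem pvFoldA_length (mr mp ind : Int) (tl : List Char) :
    ∀ (cs : List Char) (prev : List Int), prev.length = tl.length + 1 →
      (List.foldl (fun p c => pvRowA mr mp ind p c tl) prev cs).length = tl.length + 1 := by
  intro cs
  induction cs with
  | nil => intro prev h; simpa using h
  | cons c cs ih => intro prev h; exact ih _ (pvRowA_length _ _ _ _ _ _ h)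

-- ---- A's matrix as a list of rows ----
theorem pvRowsA_getLastD (mr mp ind : Int) (tl : List Char) :
    ∀ (cs : List Char) (prev d : List Int),
      (pvRowsA mr mp ind tl cs prev).getLastD d
        = List.foldl (fun p c => pvRowA mr mp ind p c tl) prev cs := by
  intro cs
  induction cs with
  | nil => intro prev d; rfl
  | cons c cs ih => intro prev d; simp only [pvRowsA, List.getLastD_cons, ih, List.foldl_cons]

theorem pvRowsA_getD (mr mp ind : Int) (tl : List Char) :
    ∀ (cs : List Char) (prev : List Int) (i : Nat), i ≤ cs.length →
      (pvRowsA mr mp ind tl cs prev).getD i []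
        = List.foldl (fun p c => pvRowA mr mp ind p c tl) prev (cs.take i) := by
  intro cs
  induction cs with
  | nil =>
    intro prev i hi
    have h0 : i = 0 := by simpa using hi
    subst h0; rfl
  | cons c cs ih =>
    intro prev i hi
    cases i with
    | zero => rfl
    | succ i =>
      simp only [pvRowsA, List.getD_cons_succ, List.take_succ_cons, List.foldl_cons]
      exact ih _ i (by simpa using hi)

-- ---- the initial row and the row iterates of A ----
def pvRow0 (ind : Int) (tl : List Char) : List Int :=
  (List.range (tl.length + 1)).map (fun j : Nat => -(j : Int) * ind)

def pvIter (mr mp ind : Int) (sl tl : List Char) (i : Nat) : List Int :=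
  List.foldl (fun p c => pvRowA mr mp ind p c tl) (pvRow0 ind tl) (sl.take i)

theorem pvRow0_length (ind : Int) (tl : List Char) : (pvRow0 ind tl).length = tl.length + 1 := by
  simp [pvRow0]

theorem pvRow0_getD (ind : Int) (tl : List Char) (j : Nat) (hj : j ≤ tl.length) :
    (pvRow0 ind tl).getD j 0 = -(j : Int) * ind := by
  unfold pvRow0
  have hj' : j < ((List.range (tl.length + 1)).map (fun j : Nat => -(j : Int) * ind)).length := by
    simpa using Nat.lt_succ_of_le hj
  rw [List.getD_eq_getElem _ _ hj', List.getElem_map, List.getElem_range]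

theorem pvIter_length (mr mp ind : Int) (sl tl : List Char) (i : Nat) :
    (pvIter mr mp ind sl tl i).length = tl.length + 1 :=
  pvFoldA_length mr mp ind tl _ _ (pvRow0_length ind tl)

theorem pvIter_spec (mr mp ind : Int) (sl tl : List Char) :
    ∀ i, i ≤ sl.length → ∀ j, j ≤ tl.length →
      (pvIter mr mp ind sl tl i).getD j 0 = pvF mr mp ind sl tl i j := by
  intro i
  induction i with
  | zero =>
    intro _ j hj
    simp only [pvIter, List.take_zero, List.foldl_nil]
    rw [pvRow0_getD _ _ _ hj]
    rfl
  | succ i ih =>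
    intro hi j hj
    have hiL : i < sl.length := by omega
    have hstep : pvIter mr mp ind sl tl (i+1)
        = pvRowA mr mp ind (pvIter mr mp ind sl tl i) (sl.getD i ' ') tl := by
      have ht : sl.take (i+1) = sl.take i ++ [sl.getD i ' '] := by
        rw [List.take_add_one, List.getElem?_eq_getElem hiL]
        simp [List.getD, List.getElem?_eq_getElem hiL]
      simp [pvIter, ht]
    rw [hstep]
    cases j with
    | zero => rfl
    | succ m =>
      have hps_len : (pvIter mr mp ind sl tl i).tail.length = tl.length := by
        simp [List.length_tail, pvIter_length]
      have happ := pvGoA_spec mr mp ind tl (sl.getD i ' ') (pvF mr mp ind sl tl i) tl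
          (pvIter mr mp ind sl tl i).tail 0 (by simp) (by simp [hps_len])
          (fun r hr => by
            rw [pvTail_getD]
            have hr' : r + 1 ≤ tl.length := by rw [hps_len] at hr; omega
            rw [ih (by omega) (r+1) hr']
            congr 1
            omega)
          m (by omega)
      simp only [pvRowA, List.getD_cons_succ]
      rw [pvHeadD_getD, ih (by omega) 0 (by omega)]
      have h0 : pvFrow ind (fun j => if sl.getD i ' ' = tl.getD j ' ' then mr else -mp)
          (pvF mr mp ind sl tl i) 0 = 0 := rfl
      have harr : (0:Nat) + 1 + m = m + 1 := by omega
      rw [h0, harr] at happ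
      exact happ

theorem pvGet2_spec (mr mp ind : Int) (sl tl : List Char) (i j : Nat)
    (hi : i ≤ sl.length) (hj : j ≤ tl.length) :
    pvGet2 (pvRowsA mr mp ind tl sl (pvRow0 ind tl)) i j = pvF mr mp ind sl tl i j := by
  unfold pvGet2
  rw [pvRowsA_getD mr mp ind tl sl _ i hi]
  exact pvIter_spec mr mp ind sl tl i hi j hj

-- ---- the direction chosen at a cell, and the alignment each cell carries ----
inductive pvDir : Type
  | D | L | U
deriving DecidableEq, Repr

def pvGdir (mr mp ind : Int) (sl tl : List Char) (i j : Nat) : pvDir :=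
  if pvF mr mp ind sl tl (i + 1) (j + 1)
      = pvF mr mp ind sl tl i j + (if sl.getD i ' ' = tl.getD j ' ' then mr else -mp) then pvDir.D
  else if pvF mr mp ind sl tl (i + 1) (j + 1) = pvF mr mp ind sl tl (i + 1) j - ind then pvDir.L
  else pvDir.U

/-- the alignment pair belonging to cell (i, j). -/
def pvAl (mr mp ind : Int) (sl tl : List Char) : Nat → Nat → List Char × List Char
  | 0, j => (List.replicate j '-', tl.take j)
  | _+1, 0 => ([], [])
  | i+1, j+1 =>
    match pvGdir mr mp ind sl tl i j with
    | .D => let p := pvAl mr mp ind sl tl i j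
            (p.1 ++ [sl.getD i ' '], p.2 ++ [tl.getD j ' '])
    | .L => let p := pvAl mr mp ind sl tl (i+1) j
            (p.1 ++ ['-'], p.2 ++ [tl.getD j ' '])
    | .U => let p := pvAl mr mp ind sl tl i (j+1)
            (p.1 ++ [sl.getD i ' '], p.2 ++ ['-'])
  termination_by i j => i + j

def pvTri (mr mp ind : Int) (sl tl : List Char) (i j : Nat) : Int × List Char × List Char :=
  (pvF mr mp ind sl tl i j, pvAl mr mp ind sl tl i j)

-- ---- the cell built by B equals pvTri at the next position ----
theorem pvCell_eq (mr mp ind : Int) (sl tl : List Char) (i k : Nat) :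
    (if max (pvF mr mp ind sl tl i k + (if sl.getD i ' ' = tl.getD k ' ' then mr else -mp))
          (max (pvF mr mp ind sl tl (i+1) k - ind) (pvF mr mp ind sl tl i (k+1) - ind))
        = pvF mr mp ind sl tl i k + (if sl.getD i ' ' = tl.getD k ' ' then mr else -mp) then
       (max (pvF mr mp ind sl tl i k + (if sl.getD i ' ' = tl.getD k ' ' then mr else -mp))
          (max (pvF mr mp ind sl tl (i+1) k - ind) (pvF mr mp ind sl tl i (k+1) - ind)),
        (pvAl mr mp ind sl tl i k).1 ++ [sl.getD i ' '],
        (pvAl mr mp ind sl tl i k).2 ++ [tl.getD k ' '])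
     else if max (pvF mr mp ind sl tl i k + (if sl.getD i ' ' = tl.getD k ' ' then mr else -mp))
          (max (pvF mr mp ind sl tl (i+1) k - ind) (pvF mr mp ind sl tl i (k+1) - ind))
        = pvF mr mp ind sl tl (i+1) k - ind then
       (max (pvF mr mp ind sl tl i k + (if sl.getD i ' ' = tl.getD k ' ' then mr else -mp))
          (max (pvF mr mp ind sl tl (i+1) k - ind) (pvF mr mp ind sl tl i (k+1) - ind)),
        (pvAl mr mp ind sl tl (i+1) k).1 ++ ['-'],
        (pvAl mr mp ind sl tl (i+1) k).2 ++ [tl.getD k ' '])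
     else
       (max (pvF mr mp ind sl tl i k + (if sl.getD i ' ' = tl.getD k ' ' then mr else -mp))
          (max (pvF mr mp ind sl tl (i+1) k - ind) (pvF mr mp ind sl tl i (k+1) - ind)),
        (pvAl mr mp ind sl tl i (k+1)).1 ++ [sl.getD i ' '],
        (pvAl mr mp ind sl tl i (k+1)).2 ++ ['-']))
    = pvTri mr mp ind sl tl (i+1) (k+1) := by
  have hv : max (pvF mr mp ind sl tl i k + (if sl.getD i ' ' = tl.getD k ' ' then mr else -mp))
      (max (pvF mr mp ind sl tl (i+1) k - ind) (pvF mr mp ind sl tl i (k+1) - ind))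
      = pvF mr mp ind sl tl (i+1) (k+1) := by
    rw [pvF_succ_succ]; omega
  rw [hv]
  unfold pvTri
  rw [pvAl]
  unfold pvGdir
  by_cases h1 : pvF mr mp ind sl tl (i+1) (k+1)
      = pvF mr mp ind sl tl i k + (if sl.getD i ' ' = tl.getD k ' ' then mr else -mp)
  · simp only [if_pos h1]
  · simp only [if_neg h1]
    by_cases h2 : pvF mr mp ind sl tl (i+1) (k+1) = pvF mr mp ind sl tl (i+1) k - ind
    · simp only [if_pos h2]
    · simp only [if_neg h2]

-- ---- characterisation of B's inner loop: scores AND alignments ----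
theorem pvGoC_spec (mr mp ind : Int) (sl tl : List Char) (i : Nat) :
    ∀ (ts : List Char) (ps : List (Int × List Char × List Char)) (k : Nat)
      (left diag : Int × List Char × List Char),
      ts = tl.drop k → ps.length = ts.length →
      (∀ r, r < ps.length → ps.getD r (0, [], []) = pvTri mr mp ind sl tl i (k + 1 + r)) →
      left = pvTri mr mp ind sl tl (i+1) k → diag = pvTri mr mp ind sl tl i k →
      ∀ m, m < ts.length →
        (pvGoC mr mp ind (sl.getD i ' ') ts ps left diag).getD m (0, [], [])
          = pvTri mr mp ind sl tl (i+1) (k + 1 + m) := by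
  intro ts
  induction ts with
  | nil => intro ps k left diag _ _ _ _ _ m hm; simp at hm
  | cons c ts ih =>
    intro ps k left diag hts hlen hp hleft hdiag m hm
    cases ps with
    | nil => simp at hlen
    | cons up ps =>
      have hc : tl.getD k ' ' = c := by
        have h1 : tl[k]? = some c := by
          have := congrArg List.head? hts
          simpa [List.head?_drop] using this.symm
        simp [List.getD, h1]
      have hts' : ts = tl.drop (k + 1) := by
        have := congrArg List.tail hts
        simpa [List.tail_drop] using this
      have hup : up = pvTri mr mp ind sl tl i (k + 1) := by
        have := hp 0 (by simp)
        simpa using this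
      subst hleft
      subst hdiag
      subst hup
      have hcell := pvCell_eq mr mp ind sl tl i k
      rw [hc] at hcell
      cases m with
      | zero =>
        simp only [pvGoC, List.getD_cons_zero, Nat.add_zero]
        exact hcell
      | succ m =>
        simp only [pvGoC, List.getD_cons_succ]
        have hrec := ih ps (k+1) _ (pvTri mr mp ind sl tl i (k+1)) hts' (by simpa using hlen)
            (fun r hr => by
              have := hp (r + 1) (by simpa using Nat.succ_lt_succ hr)
              simpa [Nat.add_assoc, Nat.add_comm, Nat.add_left_comm] using this)
            hcell rfl m (by simpa using hm)
        have e1 : k + 1 + 1 + m = k + 1 + (m + 1) := by omega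
        rw [e1] at hrec
        exact hrec

-- ---- lengths for B ----
theorem pvGoC_length (mr mp ind : Int) (si : Char) :
    ∀ (ts : List Char) (ps : List (Int × List Char × List Char)) (left diag : Int × List Char × List Char),
      ps.length = ts.length → (pvGoC mr mp ind si ts ps left diag).length = ts.length := by
  intro ts
  induction ts with
  | nil => intro ps l d h; cases ps <;> simp [pvGoC]
  | cons c ts ih =>
    intro ps l d h
    cases ps with
    | nil => simp at h
    | cons up ps => simp only [pvGoC, List.length_cons]; rw [ih _ _ _ (by simpa using h)]

theorem pvRowC_length (mr mp ind : Int) (prev : List (Int × List Char × List Char)) (si : Char)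
    (tl : List Char) (h : prev.length = tl.length + 1) :
    (pvRowC mr mp ind prev si tl).length = tl.length + 1 := by
  simp only [pvRowC, List.length_cons]
  rw [pvGoC_length _ _ _ _ _ _ _ _ (by simp [h])]

-- ---- B's row step preserves the invariant ----
theorem pvRowC_spec (mr mp ind : Int) (sl tl : List Char) (i : Nat)
    (prev : List (Int × List Char × List Char))
    (hlen : prev.length = tl.length + 1)
    (hprev : ∀ j, j ≤ tl.length → prev.getD j (0, [], []) = pvTri mr mp ind sl tl i j) :
    ∀ j, j ≤ tl.length →
      (pvRowC mr mp ind prev (sl.getD i ' ') tl).getD j (0, [], []) = pvTri mr mp ind sl tl (i+1) j := by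
  have hcol0 : pvTri mr mp ind sl tl (i+1) 0 = ((0 : Int), ([] : List Char), ([] : List Char)) := by
    have h1 : pvAl mr mp ind sl tl (i+1) 0 = ([], []) := by rw [pvAl]
    simp [pvTri, h1]
    rfl
  intro j hj
  cases j with
  | zero =>
    simp only [pvRowC, List.getD_cons_zero, hcol0]
  | succ m =>
    simp only [pvRowC, List.getD_cons_succ]
    have happ := pvGoC_spec mr mp ind sl tl i tl prev.tail 0
        ((0 : Int), ([] : List Char), ([] : List Char)) (prev.headD (0, [], []))
        (by simp) (by simp [List.length_tail, hlen])
        (fun r hr => by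
          rw [pvTail_getD']
          have hr' : r + 1 ≤ tl.length := by
            simp [List.length_tail, hlen] at hr; omega
          rw [hprev (r+1) hr']
          congr 1
          omega)
        hcol0.symm
        (by rw [pvHeadD_getD']; exact hprev 0 (by omega))
        m (by omega)
    have e : (0:Nat) + 1 + m = m + 1 := by omega
    rw [e] at happ
    exact happ

-- ---- B's fill: the final row is row |sl| of the table ----
theorem pvFillC_spec (mr mp ind : Int) (sl tl : List Char) :
    ∀ (cs : List Char) (i : Nat) (prev : List (Int × List Char × List Char)),
      cs = sl.drop i → i ≤ sl.length →
      prev.length = tl.length + 1 →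
      (∀ j, j ≤ tl.length → prev.getD j (0, [], []) = pvTri mr mp ind sl tl i j) →
      (pvFillC mr mp ind tl cs prev).length = tl.length + 1 ∧
      (∀ j, j ≤ tl.length →
        (pvFillC mr mp ind tl cs prev).getD j (0, [], []) = pvTri mr mp ind sl tl sl.length j) := by
  intro cs
  induction cs with
  | nil =>
    intro i prev hcs hi hlen hprev
    have hieq : i = sl.length := by
      have := congrArg List.length hcs
      simp at this
      omega
    subst hieq
    exact ⟨by simpa [pvFillC] using hlen, fun j hj => by simpa [pvFillC] using hprev j hj⟩
  | cons c cs ih =>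
    intro i prev hcs hi hlen hprev
    have hiL : i < sl.length := by
      by_contra h
      rw [List.drop_eq_nil_of_le (by omega)] at hcs
      simp at hcs
    have hc : sl.getD i ' ' = c := by
      have h1 : sl[i]? = some c := by
        have := congrArg List.head? hcs
        simpa [List.head?_drop] using this.symm
      simp [List.getD, h1]
    have hcs' : cs = sl.drop (i + 1) := by
      have := congrArg List.tail hcs
      simpa [List.tail_drop] using this
    simp only [pvFillC]
    exact ih (i+1) _ hcs' (by omega) (pvRowC_length mr mp ind prev c tl hlen)
      (fun j hj => by
        rw [← hc]
        exact pvRowC_spec mr mp ind sl tl i prev hlen hprev j hj)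

-- ---- B's initial row satisfies the invariant ----
theorem pvRow0C_length (ind : Int) (tl : List Char) :
    ((List.range (tl.length + 1)).map
      (fun j : Nat => (-(j : Int) * ind, List.replicate j '-', tl.take j))).length
    = tl.length + 1 := by simp

theorem pvRow0C_getD (mr mp ind : Int) (sl tl : List Char) (j : Nat) (hj : j ≤ tl.length) :
    ((List.range (tl.length + 1)).map
      (fun j : Nat => (-(j : Int) * ind, List.replicate j '-', tl.take j))).getD j (0, [], [])
    = pvTri mr mp ind sl tl 0 j := by
  have hj' : j < ((List.range (tl.length + 1)).map
      (fun j : Nat => (-(j : Int) * ind, List.replicate j '-', tl.take j))).length := by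
    simpa using Nat.lt_succ_of_le hj
  rw [List.getD_eq_getElem _ _ hj', List.getElem_map, List.getElem_range]
  have h1 : pvAl mr mp ind sl tl 0 j = (List.replicate j '-', tl.take j) := by rw [pvAl]
  simp [pvTri, h1, pvF, neg_mul]

-- ---- A's traceback: accumulator lemma ----
theorem pvTbA_acc (mr mp ind : Int) (sl tl : List Char) (sm : List (List Int)) :
    ∀ (N i j : Nat) (als alt : List Char), i + j ≤ N →
      pvTbA mr mp ind sl tl sm i j als alt
        = ((pvTbA mr mp ind sl tl sm i j [] []).1 ++ als,
           (pvTbA mr mp ind sl tl sm i j [] []).2 ++ alt) := by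
  intro N
  induction N with
  | zero =>
    intro i j als alt hN
    have hi0 : i = 0 := by omega
    have hj0 : j = 0 := by omega
    subst hi0; subst hj0
    simp [pvTbA]
  | succ N ihN =>
    intro i j als alt hN
    cases i with
    | zero =>
      cases j with
      | zero => simp [pvTbA]
      | succ j => simp [pvTbA]
    | succ i =>
      cases j with
      | zero => simp [pvTbA]
      | succ j =>
        simp only [pvTbA]
        split_ifs with h1 h2 h3 h4
        · rw [ihN i j _ _ (by omega), ihN i j [_] [_] (by omega)]
          simp
        · rw [ihN i j _ _ (by omega), ihN i j [_] [_] (by omega)]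
          simp
        · rw [ihN (i+1) j _ _ (by omega), ihN (i+1) j [_] [_] (by omega)]
          simp
        · rw [ihN i (j+1) _ _ (by omega), ihN i (j+1) [_] [_] (by omega)]
          simp
        · simp

-- ---- A's traceback computes pvAl ----
theorem pvTbA_eq_pvAl (mr mp ind : Int) (sl tl : List Char) (sm : List (List Int))
    (hsm : ∀ i j, i ≤ sl.length → j ≤ tl.length → pvGet2 sm i j = pvF mr mp ind sl tl i j) :
    ∀ (N i j : Nat), i + j ≤ N → i ≤ sl.length → j ≤ tl.length →
      pvTbA mr mp ind sl tl sm i j [] [] = pvAl mr mp ind sl tl i j := by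
  intro N
  induction N with
  | zero =>
    intro i j hN hi hj
    have hi0 : i = 0 := by omega
    have hj0 : j = 0 := by omega
    subst hi0; subst hj0
    simp [pvTbA, pvAl]
  | succ N ihN =>
    intro i j hN hi hj
    cases i with
    | zero =>
      cases j with
      | zero => simp [pvTbA, pvAl]
      | succ j => simp [pvTbA, pvAl]
    | succ i =>
      cases j with
      | zero => simp [pvTbA, pvAl]
      | succ j =>
        have hi' : i < sl.length := by omega
        have hj' : j < tl.length := by omega
        have hA11 := hsm (i+1) (j+1) hi hj
        have hA00 := hsm i j (by omega) (by omega)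
        have hA10 := hsm (i+1) j hi (by omega)
        have hA01 := hsm i (j+1) (by omega) hj
        rw [pvAl]
        simp only [pvTbA, hA11, hA00, hA10, hA01]
        by_cases hd : pvF mr mp ind sl tl (i+1) (j+1)
            = pvF mr mp ind sl tl i j + (if sl.getD i ' ' = tl.getD j ' ' then mr else -mp)
        · rw [pvGdir, if_pos hd]
          by_cases hc : sl.getD i ' ' = tl.getD j ' '
          · rw [if_pos (show sl.getD i ' ' = tl.getD j ' ' ∧
                pvF mr mp ind sl tl (i+1) (j+1) = pvF mr mp ind sl tl i j + mr from
                ⟨hc, by rwa [if_pos hc] at hd⟩)]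
            rw [pvTbA_acc mr mp ind sl tl sm (i+j) i j [_] [_] (by omega),
                ihN i j (by omega) (by omega) (by omega)]
          · rw [if_neg (fun h => hc h.1),
                if_pos (show ¬ sl.getD i ' ' = tl.getD j ' ' ∧
                  pvF mr mp ind sl tl (i+1) (j+1) = pvF mr mp ind sl tl i j - mp from
                  ⟨hc, by rw [if_neg hc] at hd; omega⟩)]
            rw [pvTbA_acc mr mp ind sl tl sm (i+j) i j [_] [_] (by omega),
                ihN i j (by omega) (by omega) (by omega)]
        · have hnc1 : ¬ (sl.getD i ' ' = tl.getD j ' ' ∧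
              pvF mr mp ind sl tl (i+1) (j+1) = pvF mr mp ind sl tl i j + mr) := by
            rintro ⟨h1, h2⟩
            exact hd (by rw [if_pos h1]; exact h2)
          have hnc2 : ¬ (¬ sl.getD i ' ' = tl.getD j ' ' ∧
              pvF mr mp ind sl tl (i+1) (j+1) = pvF mr mp ind sl tl i j - mp) := by
            rintro ⟨h1, h2⟩
            exact hd (by rw [if_neg h1]; omega)
          by_cases hl : pvF mr mp ind sl tl (i+1) (j+1) = pvF mr mp ind sl tl (i+1) j - ind
          · rw [pvGdir, if_neg hd, if_pos hl, if_neg hnc1, if_neg hnc2, if_pos hl]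
            rw [pvTbA_acc mr mp ind sl tl sm (i+1+j) (i+1) j [_] [_] (by omega),
                ihN (i+1) j (by omega) (by omega) (by omega)]
          · have h4 : pvF mr mp ind sl tl (i+1) (j+1) = pvF mr mp ind sl tl i (j+1) - ind := by
              have hrec := pvF_succ_succ mr mp ind sl tl i j
              omega
            rw [pvGdir, if_neg hd, if_neg hl, if_neg hnc1, if_neg hnc2, if_neg hl, if_pos h4]
            rw [pvTbA_acc mr mp ind sl tl sm (i+j+1) i (j+1) [_] [_] (by omega),
                ihN i (j+1) (by omega) (by omega) (by omega)]

-- ---- the two last score rows are the same list ----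
theorem pvScores_eq (mr mp ind : Int) (sl tl : List Char) :
    ((pvFillC mr mp ind tl sl
        ((List.range (tl.length + 1)).map
          (fun j : Nat => (-(j : Int) * ind, List.replicate j '-', tl.take j)))).map (fun c => c.1))
      = List.foldl (fun p c => pvRowA mr mp ind p c tl) (pvRow0 ind tl) sl := by
  obtain ⟨hBlen, hBget⟩ := pvFillC_spec mr mp ind sl tl sl 0 _ (by simp) (Nat.zero_le _)
      (pvRow0C_length ind tl) (fun j hj => pvRow0C_getD mr mp ind sl tl j hj)
  have hAlen : (List.foldl (fun p c => pvRowA mr mp ind p c tl) (pvRow0 ind tl) sl).length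
      = tl.length + 1 := pvFoldA_length mr mp ind tl sl _ (pvRow0_length ind tl)
  apply List.ext_getElem
  · rw [List.length_map, hBlen, hAlen]
  · intro j h1 h2
    have hj : j ≤ tl.length := by
      rw [List.length_map, hBlen] at h1
      omega
    have hA : (List.foldl (fun p c => pvRowA mr mp ind p c tl) (pvRow0 ind tl) sl).getD j 0
        = pvF mr mp ind sl tl sl.length j := by
      have := pvIter_spec mr mp ind sl tl sl.length (le_refl _) j hj
      simpa [pvIter] using this
    have hB := hBget j hj
    rw [List.getD_eq_getElem _ _ h2] at hA
    have h1' : j < (pvFillC mr mp ind tl sl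
        ((List.range (tl.length + 1)).map
          (fun j : Nat => (-(j : Int) * ind, List.replicate j '-', tl.take j)))).length := by
      omega
    rw [List.getD_eq_getElem _ _ h1'] at hB
    rw [List.getElem_map]
    rw [hB, hA]
    rfl

-- ===== VERDICT (by name: the statement is the Claim_ definition above) =====
theorem OverlapAlignment_spec : Claim_equal_OverlapAlignment := by
  intro mr mp ind s t _
  unfold Spec_OverlapAlignment
  show OverlapAlignment mr mp ind s t = OverlapAlignment_alt mr mp ind s t
  simp only [OverlapAlignment, OverlapAlignment_alt]
  rw [show (List.range (t.toList.length + 1)).map (fun j : Nat => -(j : Int) * ind)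
      = pvRow0 ind t.toList from rfl]
  rw [pvRowsA_getLastD, pvScores_eq]
  set L := List.foldl (fun p c => pvRowA mr mp ind p c t.toList) (pvRow0 ind t.toList) s.toList with hL
  set M := (PySem.List.max? L (fun x => x)).getD 0 with hM
  set J := (PySem.List.index? L M).getD 0 with hJdef
  have hLlen : L.length = t.toList.length + 1 :=
    pvFoldA_length mr mp ind t.toList s.toList _ (pvRow0_length ind t.toList)
  have hJ : J ≤ t.toList.length := by
    rcases hI : PySem.List.index? L M with _ | k
    · rw [hJdef, hI]; simp
    · obtain ⟨hk, -⟩ := PySem.List.getElem_of_index?_eq_some hI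
      rw [hLlen] at hk
      simp only [hJdef, hI, Option.getD_some]
      omega
  obtain ⟨hBlen, hBget⟩ := pvFillC_spec mr mp ind s.toList t.toList s.toList 0 _ (by simp) (Nat.zero_le _)
      (pvRow0C_length ind t.toList) (fun j hj => pvRow0C_getD mr mp ind s.toList t.toList j hj)
  have hcell := hBget J hJ
  have hTB := pvTbA_eq_pvAl mr mp ind s.toList t.toList
      (pvRowsA mr mp ind t.toList s.toList (pvRow0 ind t.toList))
      (fun i j hi hj => pvGet2_spec mr mp ind s.toList t.toList i j hi hj)
      (s.toList.length + J) s.toList.length J (le_refl _) (le_refl _) hJ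
  rw [hTB, hcell]
  rfl
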